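-- pv_equiv track=rewrite | github.com/arthurlocce/Projetos-PUC | PROJETO INTEGRADOR 1 SEMESTRE.py | criptografia_hills
-- ===== SOURCE A (Python) =====
-- def criptografia_hills(criptografar):
--     alfabeto = ['Z', 'A', 'B', 'C', 'D', 'E', 'F', 'G', 'H', 'I', 'J', 'K', 'L', 'M', 'N', 'O', 'P', 'Q', 'R', 'S', 'T',
--                 'U', 'V', 'W', 'X', 'Y']
--     matriz_chave = [[4, 3], [1, 2]]
--
--     indices = [alfabeto.index(letra) for letra in criptografar if letra in alfabeto]
--     if len(indices) % 2 != 0: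
--         indices.append(indices[-1])
--
--     num_cols = 2
--     matriz_palavra = [indices[i:i + num_cols] for i in range(0, len(indices), num_cols)]
--     matriz_criptografada = []
--
--     for vetor in matriz_palavra:
--         for linha in matriz_chave:
--             produto = sum(linha[i] * vetor[i] for i in range(len(vetor)))
--             matriz_criptografada.append(produto)
--
--     for i in range(len(matriz_criptografada)):
--         matriz_criptografada[i] = matriz_criptografada[i] % 26
--         while matriz_criptografada[i] < 0:
--             matriz_criptografada[i] += 26
--
--     descricao_criptografada = ''.join(alfabeto[i] for i in matriz_criptografada)
--     return descricao_criptografada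
-- ===== SOURCE B (Python) =====
-- def criptografia_hills(criptografar):
--     alfabeto = 'ZABCDEFGHIJKLMNOPQRSTUVWXY'
--     # digram substitution table: precompute the cipher image of every possible 2-letter block,
--     # so encryption itself is pure table lookup with no per-block arithmetic
--     tabela = {}
--     for n in range(676):
--         i, j = n // 26, n % 26
--         tabela[(alfabeto[i], alfabeto[j])] = alfabeto[(4 * i + 3 * j) % 26] + alfabeto[(i + 2 * j) % 26]
--     kept = [c for c in criptografar if c in alfabeto]
--     if len(kept) % 2:
--         kept.append(kept[-1])
--     return ''.join(tabela[(kept[k], kept[k + 1])] for k in range(0, len(kept), 2))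
-- ===== Notes on version B (the rewrite author's own statement) =====
-- stated objective: faster
-- what changed: B turns the Hill cipher into a digram substitution: it precomputes once a 676-entry table mapping every possible 2-letter block to its cipher block, so encryption is a single pass of pure table lookups, with none of A's per-letter list.index scans, chunk list, product list or separate mod-26 pass.
import Mathlib
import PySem

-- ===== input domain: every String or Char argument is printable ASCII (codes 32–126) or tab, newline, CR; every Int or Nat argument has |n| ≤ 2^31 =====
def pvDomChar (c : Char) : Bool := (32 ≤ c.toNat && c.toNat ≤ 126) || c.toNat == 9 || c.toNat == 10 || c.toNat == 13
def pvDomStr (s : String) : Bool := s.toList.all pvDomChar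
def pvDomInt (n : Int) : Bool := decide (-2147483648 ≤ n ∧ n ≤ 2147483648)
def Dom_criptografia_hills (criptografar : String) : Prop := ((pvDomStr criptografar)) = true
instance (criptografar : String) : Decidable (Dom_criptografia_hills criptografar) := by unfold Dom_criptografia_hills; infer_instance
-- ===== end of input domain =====

-- B precomputes the cipher image of every possible 2-letter block in a 676-entry digram table,
-- so encryption is one pass of pure table lookups (objective: faster, constant factor).

-- ===== PORT A =====
def pvAlfA : List Char :=
  ['Z','A','B','C','D','E','F','G','H','I','J','K','L','M','N','O','P','Q','R','S','T','U','V','W','X','Y']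
def pvMatrizChave : List (List Int) := [[4, 3], [1, 2]]

def criptografia_hills (criptografar : String) : String :=
  let alfabeto := pvAlfA
  -- alfabeto.index(letra): always succeeds because the filter keeps only members; the getD default is never taken
  let indices : List Int :=
    (criptografar.toList.filter (fun letra => alfabeto.contains letra)).map
      (fun letra => (((PySem.List.index? alfabeto letra).getD 0 : Nat) : Int))
  let indices := if PySem.Int.mod (PySem.List.len indices) 2 ≠ 0
    then indices ++ [PySem.List.pyGetD indices (-1) 0] else indices
  let matriz_palavra := (PySem.List.pyRange 0 (PySem.List.len indices) 2).map
    (fun i => PySem.List.slice indices (some i) (some (i + 2)))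
  let matriz_criptografada := matriz_palavra.foldl
    (fun acc vetor => pvMatrizChave.foldl
      (fun acc2 linha => acc2 ++ [((PySem.List.pyRange 0 (PySem.List.len vetor) 1).map
        (fun i => PySem.List.pyGetD linha i 0 * PySem.List.pyGetD vetor i 0)).sum]) acc) []
  -- the Python 'while … < 0: += 26' after '% 26' never executes: PySem.Int.mod _ 26 is nonnegative
  let matriz_criptografada := matriz_criptografada.map (fun x => PySem.Int.mod x 26)
  -- alfabeto[i]: i = _ % 26 is always in range, the default is never taken
  String.mk (matriz_criptografada.map (fun i => PySem.List.pyGetD alfabeto i 'Z'))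

-- ===== PORT B =====
def pvAlfB : List Char := "ZABCDEFGHIJKLMNOPQRSTUVWXY".toList

-- tabela[(alfabeto[i], alfabeto[j])] = alfabeto[(4i+3j)%26] + alfabeto[(i+2j)%26] for n in range(676), i,j = n//26, n%26
-- (the two-char value string is held as its List Char; all alphabet indexings are in range, defaults never taken)
def pvTabela : PySem.Dict (Char × Char) (List Char) :=
  (PySem.List.pyRange 0 676 1).foldl (fun d n =>
    d.insert (PySem.List.pyGetD pvAlfB (PySem.Int.floordiv n 26) 'Z',
              PySem.List.pyGetD pvAlfB (PySem.Int.mod n 26) 'Z')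
      [PySem.List.pyGetD pvAlfB (PySem.Int.mod (4 * PySem.Int.floordiv n 26 + 3 * PySem.Int.mod n 26) 26) 'Z',
       PySem.List.pyGetD pvAlfB (PySem.Int.mod (PySem.Int.floordiv n 26 + 2 * PySem.Int.mod n 26) 26) 'Z'])
    PySem.Dict.empty

-- 'c in alfabeto' with a single char c and alfabeto a string is char membership
def criptografia_hills_alt (criptografar : String) : String :=
  let kept := criptografar.toList.filter (fun c => pvAlfB.contains c)
  let kept := if PySem.Int.mod (PySem.List.len kept) 2 ≠ 0
    then kept ++ [PySem.List.pyGetD kept (-1) 'Z'] else kept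
  String.mk (((PySem.List.pyRange 0 (PySem.List.len kept) 2).map
    (fun k => PySem.Dict.getD pvTabela
      (PySem.List.pyGetD kept k 'Z', PySem.List.pyGetD kept (k + 1) 'Z') [])).flatten)

-- ===== PRECONDITION & SPEC =====
def Spec_criptografia_hills (criptografar : String) (out : String) : Prop := out = criptografia_hills_alt criptografar
instance (criptografar : String) (out : String) : Decidable (Spec_criptografia_hills criptografar out) := by unfold Spec_criptografia_hills; infer_instance

-- ===== CLAIM (what is proved, stated in full; the proofs are below) =====
def Claim_equal_criptografia_hills : Prop := ∀ (criptografar : String), Dom_criptografia_hills criptografar → Spec_criptografia_hills criptografar (criptografia_hills criptografar)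

-- ===== LEMMAS AND PROOFS =====

lemma pvAlfB_eq : pvAlfB = pvAlfA := by decide

def pvIxf (letra : Char) : Int := (((PySem.List.index? pvAlfA letra).getD 0 : Nat) : Int)

-- the key/value functions of the table-building loop
def pvKey (n : Int) : Char × Char :=
  (PySem.List.pyGetD pvAlfB (PySem.Int.floordiv n 26) 'Z',
   PySem.List.pyGetD pvAlfB (PySem.Int.mod n 26) 'Z')
def pvVal (n : Int) : List Char :=
  [PySem.List.pyGetD pvAlfB (PySem.Int.mod (4 * PySem.Int.floordiv n 26 + 3 * PySem.Int.mod n 26) 26) 'Z',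
   PySem.List.pyGetD pvAlfB (PySem.Int.mod (PySem.Int.floordiv n 26 + 2 * PySem.Int.mod n 26) 26) 'Z']

lemma pv_key_inj : ∀ x ∈ PySem.List.pyRange 0 676 1, ∀ y ∈ PySem.List.pyRange 0 676 1,
    pvKey x = pvKey y → x = y := by
  intro x hx y hy hk
  rw [PySem.List.mem_pyRange_one] at hx hy
  have hdx := PySem.Int.floordiv_mul_add_mod x 26
  have hdy := PySem.Int.floordiv_mul_add_mod y 26
  have hrx0 := PySem.Int.mod_nonneg x (b := 26) (by norm_num)
  have hrx1 := PySem.Int.mod_lt x (b := 26) (by norm_num)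
  have hry0 := PySem.Int.mod_nonneg y (b := 26) (by norm_num)
  have hry1 := PySem.Int.mod_lt y (b := 26) (by norm_num)
  have hqx0 : 0 ≤ PySem.Int.floordiv x 26 := by omega
  have hqx1 : PySem.Int.floordiv x 26 < 26 := by omega
  have hqy0 : 0 ≤ PySem.Int.floordiv y 26 := by omega
  have hqy1 : PySem.Int.floordiv y 26 < 26 := by omega
  have halen : pvAlfB.length = 26 := by decide
  have hnd : pvAlfB.Nodup := by decide
  have h1 : PySem.Int.floordiv x 26 = PySem.Int.floordiv y 26 := by
    have := congrArg Prod.fst hk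
    simp only [pvKey] at this
    rw [PySem.List.pyGetD_eq_getElem pvAlfB 'Z' (by omega) (by rw [halen]; omega),
        PySem.List.pyGetD_eq_getElem pvAlfB 'Z' (by omega) (by rw [halen]; omega)] at this
    have := (List.Nodup.getElem_inj_iff hnd).mp this
    omega
  have h2 : PySem.Int.mod x 26 = PySem.Int.mod y 26 := by
    have := congrArg Prod.snd hk
    simp only [pvKey] at this
    rw [PySem.List.pyGetD_eq_getElem pvAlfB 'Z' (by omega) (by rw [halen]; omega),
        PySem.List.pyGetD_eq_getElem pvAlfB 'Z' (by omega) (by rw [halen]; omega)] at this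
    have := (List.Nodup.getElem_inj_iff hnd).mp this
    omega
  omega

lemma pv_items : pvTabela.items = (PySem.List.pyRange 0 676 1).map (fun n => (pvKey n, pvVal n)) := by
  have h := PySem.Dict.items_foldl_insert_fresh (PySem.List.pyRange 0 676 1) pvKey pvVal
    PySem.Dict.empty (fun a _ => by simp [pysem])
    (List.Nodup.map_on pv_key_inj (PySem.List.nodup_pyRange_one 0 676))
  have he : pvTabela = (PySem.List.pyRange 0 676 1).foldl
      (fun d n => d.insert (pvKey n) (pvVal n)) PySem.Dict.empty := rfl
  rw [he, h]
  simp [PySem.Dict.empty]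

lemma pv_nodup_keys : pvTabela.keys.Nodup := by
  have h : pvTabela.keys = ((PySem.List.pyRange 0 676 1).map (fun n => (pvKey n, pvVal n))).map (·.1) := by
    simp only [PySem.Dict.keys, pv_items]
  rw [h, List.map_map]
  exact List.Nodup.map_on (fun x hx y hy he => pv_key_inj x hx y hy he)
    (PySem.List.nodup_pyRange_one 0 676)

lemma pv_tab (a b : Char) (ha : a ∈ pvAlfA) (hb : b ∈ pvAlfA) :
    PySem.Dict.getD pvTabela (a, b) [] =
      [PySem.List.pyGetD pvAlfA (PySem.Int.mod (4 * pvIxf a + 3 * pvIxf b) 26) 'Z',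
       PySem.List.pyGetD pvAlfA (PySem.Int.mod (pvIxf a + 2 * pvIxf b) 26) 'Z'] := by
  obtain ⟨ia, hia⟩ := Option.isSome_iff_exists.mp ((PySem.List.index?_isSome_iff pvAlfA a).mpr ha)
  obtain ⟨ib, hib⟩ := Option.isSome_iff_exists.mp ((PySem.List.index?_isSome_iff pvAlfA b).mpr hb)
  obtain ⟨hialt, hgeta, -⟩ := PySem.List.getElem_of_index?_eq_some hia
  obtain ⟨hiblt, hgetb, -⟩ := PySem.List.getElem_of_index?_eq_some hib
  have hlen : pvAlfA.length = 26 := by decide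
  have hixa : pvIxf a = (ia : Int) := by simp only [pvIxf, hia, Option.getD_some]
  have hixb : pvIxf b = (ib : Int) := by simp only [pvIxf, hib, Option.getD_some]
  have hq : PySem.Int.floordiv (26 * (ia : Int) + (ib : Int)) 26 = (ia : Int) :=
    (PySem.Int.floordiv_eq_iff_of_pos (by norm_num)).mpr (by constructor <;> omega)
  have hr : PySem.Int.mod (26 * (ia : Int) + (ib : Int)) 26 = (ib : Int) := by
    have := PySem.Int.floordiv_mul_add_mod (26 * (ia : Int) + (ib : Int)) 26
    rw [hq] at this; omega
  have hkey : pvKey (26 * (ia : Int) + (ib : Int)) = (a, b) := by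
    simp only [pvKey, pvAlfB_eq, hq, hr]
    simp only [PySem.List.pyGetD_natCast]
    rw [List.getD_eq_getElem _ _ hialt, List.getD_eq_getElem _ _ hiblt, hgeta, hgetb]
  have hmem : ((a, b), pvVal (26 * (ia : Int) + (ib : Int))) ∈ pvTabela.items := by
    rw [pv_items]
    exact List.mem_map.mpr ⟨26 * (ia : Int) + (ib : Int),
      PySem.List.mem_pyRange_one.mpr (by constructor <;> omega), by rw [hkey]⟩
  rw [PySem.Dict.getD_of_mem_items pvTabela hmem pv_nodup_keys []]
  simp only [pvVal, pvAlfB_eq, hq, hr, hixa, hixb]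

-- pairwise grouping used by the proofs
def pvChunk2 : List Int → List (List Int)
  | a :: b :: rest => [a, b] :: pvChunk2 rest
  | _ => []

def pvPairs {α : Type} : List α → List (α × α)
  | a :: b :: rest => (a, b) :: pvPairs rest
  | _ => []

def pvFlat : List Int → List Int
  | a :: b :: rest => (4 * a + 3 * b) :: (a + 2 * b) :: pvFlat rest
  | _ => []

def pvEncode : List Int → List Char
  | a :: b :: rest =>
      PySem.List.pyGetD pvAlfA (PySem.Int.mod (4 * a + 3 * b) 26) 'Z'
        :: PySem.List.pyGetD pvAlfA (PySem.Int.mod (a + 2 * b) 26) 'Z'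
        :: pvEncode rest
  | _ => []

lemma pv_take_drop (m : Nat) (l : List Int) (hl : l.length = 2 * m) :
    (List.range m).map (fun k => (l.drop (2 * k)).take 2) = pvChunk2 l := by
  induction m generalizing l with
  | zero =>
      have : l = [] := by
        cases l with
        | nil => rfl
        | cons a t => simp at hl
      simp [this, pvChunk2]
  | succ m ih =>
      match l, hl with
      | a :: b :: rest, hl =>
        have hr : rest.length = 2 * m := by simp at hl; omega
        rw [List.range_succ_eq_map, List.map_cons, List.map_map, pvChunk2]
        refine List.cons_eq_cons.mpr ⟨by simp, ?_⟩
        rw [← ih rest hr]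
        refine List.map_congr_left ?_
        intro k _
        have h2 : 2 * (k + 1) = (2 * k).succ.succ := by omega
        simp only [Function.comp, Nat.succ_eq_add_one, h2, List.drop_succ_cons]

lemma pv_chunks (l : List Int) (h : l.length % 2 = 0) :
    (PySem.List.pyRange 0 (PySem.List.len l) 2).map
        (fun i => PySem.List.slice l (some i) (some (i + 2))) = pvChunk2 l := by
  obtain ⟨m, hm⟩ : ∃ m, l.length = 2 * m := ⟨l.length / 2, by omega⟩
  rw [PySem.List.len_eq, PySem.List.pyRange_of_pos 0 (l.length : Int) (by norm_num)]
  have hcount : (if (0:Int) < (l.length : Int)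
      then (((l.length : Int) - 0 + 2 - 1) / 2).toNat else 0) = m := by
    split <;> omega
  rw [hcount, List.map_map, ← pv_take_drop m l hm]
  refine List.map_congr_left ?_
  intro k _
  show PySem.List.slice l (some (0 + 2 * (k : Int))) (some (0 + 2 * (k : Int) + 2)) = _
  have e1 : (0 + 2 * (k : Int)) = ((2 * k : Nat) : Int) := by push_cast; ring
  have e2 : (0 + 2 * (k : Int) + 2) = ((2 * k : Nat) : Int) + ((2 : Nat) : Int) := by
    push_cast; ring
  rw [e2, e1, PySem.List.slice_natCast_add l (2 * k) 2]

lemma pv_dot (a b : Int) (linha : List Int) :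
    ((PySem.List.pyRange 0 (PySem.List.len [a, b]) 1).map
      (fun i => PySem.List.pyGetD linha i 0 * PySem.List.pyGetD [a, b] i 0)).sum
    = PySem.List.pyGetD linha 0 0 * a + PySem.List.pyGetD linha 1 0 * b := by
  have hR : PySem.List.pyRange 0 (PySem.List.len [a, b]) 1 = [0, 1] := by
    simp only [PySem.List.len_eq, List.length_cons, List.length_nil]
    decide
  rw [hR]
  simp [PySem.List.pyGetD, PySem.List.pyGet?, PySem.List.pyIdx?]

lemma pv_fold (l : List Int) :
    ∀ acc, (pvChunk2 l).foldl
      (fun acc vetor => pvMatrizChave.foldl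
        (fun acc2 linha => acc2 ++ [((PySem.List.pyRange 0 (PySem.List.len vetor) 1).map
          (fun i => PySem.List.pyGetD linha i 0 * PySem.List.pyGetD vetor i 0)).sum]) acc) acc
      = acc ++ pvFlat l := by
  induction l using pvChunk2.induct with
  | case1 a b rest ih =>
      intro acc
      rw [pvChunk2, pvFlat, List.foldl_cons, ih]
      simp only [pvMatrizChave, List.foldl_cons, List.foldl_nil, pv_dot]
      simp [PySem.List.pyGetD, PySem.List.pyGet?, PySem.List.pyIdx?]
  | case2 l h1 =>
      intro acc
      match l, h1 with
      | [], _ => simp [pvChunk2, pvFlat]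
      | [a], _ => simp [pvChunk2, pvFlat]
      | a :: b :: r, h1 => exact absurd rfl (fun h => h1 a b r h)

lemma pv_encode (l : List Int) (h : l.length % 2 = 0) :
    ((pvFlat l).map (fun x => PySem.Int.mod x 26)).map
        (fun i => PySem.List.pyGetD pvAlfA i 'Z') = pvEncode l := by
  induction l using pvChunk2.induct with
  | case1 a b rest ih =>
      have hr : rest.length % 2 = 0 := by simp at h; omega
      rw [pvFlat, pvEncode]
      simp only [List.map_cons]
      exact List.cons_eq_cons.mpr ⟨rfl, List.cons_eq_cons.mpr ⟨rfl, ih hr⟩⟩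
  | case2 l h1 =>
      match l, h, h1 with
      | [], _, _ => rfl
      | [a], h, _ => simp at h
      | a :: b :: r, _, h1 => exact absurd rfl (fun hh => h1 a b r hh)

lemma pv_pairs_takedrop {α β : Type} (d : α) (g : α → α → β) (m : Nat) :
    ∀ (K : List α), K.length = 2 * m →
      (List.range m).map (fun t => g (K.getD (2 * t) d) (K.getD (2 * t + 1) d))
        = (pvPairs K).map (fun p => g p.1 p.2) := by
  induction m with
  | zero =>
      intro K hK
      have : K = [] := by
        cases K with
        | nil => rfl
        | cons a t => simp at hK
      simp [this, pvPairs]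
  | succ m ih =>
      intro K hK
      match K, hK with
      | a :: b :: rest, hK =>
        have hr : rest.length = 2 * m := by simp at hK; omega
        rw [List.range_succ_eq_map, List.map_cons, List.map_map, pvPairs, List.map_cons]
        refine List.cons_eq_cons.mpr ⟨by simp, ?_⟩
        rw [← ih rest hr]
        refine List.map_congr_left ?_
        intro t _
        have h1 : 2 * (t + 1) = 2 * t + 1 + 1 := by omega
        simp only [Function.comp, h1, List.getD_cons_succ]

lemma pv_pairs_range {α β : Type} (d : α) (g : α → α → β) (K : List α) (h : K.length % 2 = 0) :
    (PySem.List.pyRange 0 (PySem.List.len K) 2).map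
        (fun i => g (PySem.List.pyGetD K i d) (PySem.List.pyGetD K (i + 1) d))
      = (pvPairs K).map (fun p => g p.1 p.2) := by
  obtain ⟨m, hm⟩ : ∃ m, K.length = 2 * m := ⟨K.length / 2, by omega⟩
  rw [PySem.List.len_eq, PySem.List.pyRange_of_pos 0 (K.length : Int) (by norm_num)]
  have hcount : (if (0:Int) < (K.length : Int)
      then (((K.length : Int) - 0 + 2 - 1) / 2).toNat else 0) = m := by
    split <;> omega
  rw [hcount, List.map_map, ← pv_pairs_takedrop d g m K hm]
  refine List.map_congr_left ?_
  intro t _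
  show g (PySem.List.pyGetD K (0 + 2 * (t : Int)) d) (PySem.List.pyGetD K (0 + 2 * (t : Int) + 1) d) = _
  have e1 : (0 + 2 * (t : Int)) = ((2 * t : Nat) : Int) := by push_cast; ring
  have e2 : (0 + 2 * (t : Int) + 1) = ((2 * t + 1 : Nat) : Int) := by push_cast; ring
  rw [e2, e1, PySem.List.pyGetD_natCast, PySem.List.pyGetD_natCast]

lemma pv_flatten (K : List Char) (hmem : ∀ c ∈ K, c ∈ pvAlfA) :
    ((pvPairs K).map (fun p => PySem.Dict.getD pvTabela p [])).flatten
      = pvEncode (K.map pvIxf) := by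
  induction K using pvPairs.induct with
  | case1 a b rest ih =>
      have ha := hmem a (by simp)
      have hb := hmem b (by simp)
      rw [pvPairs]
      simp only [List.map_cons, List.flatten_cons]
      rw [pv_tab a b ha hb]
      show _ = pvEncode (pvIxf a :: pvIxf b :: rest.map pvIxf)
      rw [pvEncode]
      simp only [List.cons_append, List.nil_append]
      exact congrArg _ (congrArg _ (ih (fun c hc => hmem c (by simp [hc]))))
  | case2 K h1 =>
      match K, h1 with
      | [], _ => rfl
      | [a], _ => rfl
      | a :: b :: r, h1 => exact absurd rfl (fun h => h1 a b r h)

-- ===== VERDICT (by name: the statement is the Claim_ definition above) =====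
theorem criptografia_hills_spec : Claim_equal_criptografia_hills := by
  intro s _
  unfold Spec_criptografia_hills
  simp only [criptografia_hills, criptografia_hills_alt, pvAlfB_eq]
  set F : List Char := s.toList.filter (fun c => pvAlfA.contains c) with hF
  set L : List Int := F.map (fun letra => (((PySem.List.index? pvAlfA letra).getD 0 : Nat) : Int)) with hL
  have hLf : L = F.map pvIxf := rfl
  set P : List Int := if PySem.Int.mod (PySem.List.len L) 2 ≠ 0
      then L ++ [PySem.List.pyGetD L (-1) 0] else L with hP
  set K : List Char := if PySem.Int.mod (PySem.List.len F) 2 ≠ 0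
      then F ++ [PySem.List.pyGetD F (-1) 'Z'] else F with hK
  have hmodL : PySem.Int.mod (PySem.List.len L) 2 = ((F.length : Int)) % 2 := by
    rw [hLf, PySem.List.len_eq, List.length_map, PySem.Int.mod_eq_emod_of_pos (by norm_num)]
  have hmodF : PySem.Int.mod (PySem.List.len F) 2 = ((F.length : Int)) % 2 := by
    rw [PySem.List.len_eq, PySem.Int.mod_eq_emod_of_pos (by norm_num)]
  have hmemF : ∀ c ∈ F, c ∈ pvAlfA := by
    intro x hx
    rw [hF] at hx
    have := List.mem_filter.mp hx
    simpa using this.2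
  have hPK : P = K.map pvIxf := by
    rw [hP, hK]
    simp only [hmodL, hmodF]
    split_ifs with hodd
    · have hne : F ≠ [] := by
        intro h; rw [h] at hodd; simp at hodd
      have hneL : L ≠ [] := by
        rw [hLf]; simpa using hne
      rw [hLf, List.map_append]
      refine congrArg _ ?_
      rw [PySem.List.pyGetD_neg_one F 'Z' hne, List.map_singleton]
      rw [PySem.List.pyGetD_neg_one (F.map pvIxf) 0 (by simpa using hne)]
      rw [List.getLast_map]
    · exact hLf
  have heven : K.length % 2 = 0 := by
    rw [hK]
    simp only [hmodF]
    split_ifs with h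
    · simp only [List.length_append, List.length_cons, List.length_nil]; omega
    · omega
  have hevenP : P.length % 2 = 0 := by
    rw [hPK, List.length_map]; exact heven
  have hmemK : ∀ c ∈ K, c ∈ pvAlfA := by
    rw [hK]
    intro c hc
    split_ifs at hc with h
    · rcases List.mem_append.mp hc with h1 | h1
      · exact hmemF c h1
      · have hne : F ≠ [] := by
          intro hFe
          rw [hFe] at h
          exact h (by decide)
        rw [List.mem_singleton.mp h1, PySem.List.pyGetD_neg_one F 'Z' hne]
        exact hmemF _ (List.getLast_mem hne)
    · exact hmemF c hc
  rw [pv_chunks P hevenP, pv_fold P [], List.nil_append, pv_encode P hevenP]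
  rw [pv_pairs_range 'Z' (fun x y => PySem.Dict.getD pvTabela (x, y) []) K heven]
  have : (pvPairs K).map ((fun p => PySem.Dict.getD pvTabela p []) : Char × Char → List Char)
      = (pvPairs K).map (fun p => PySem.Dict.getD pvTabela (p.1, p.2) []) := by
    refine List.map_congr_left ?_; intro p _; rfl
  rw [← this, pv_flatten K hmemK, hPK]
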